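-- pv_equiv track=rewrite | github.com/melisaguzman/DDYA_2026-1 | SEMANA 3/Ejercicios.py | encontrar_N
-- ===== SOURCE A (Python) =====
-- def contar_bits(n):
--     return bin(n).count("1")
--
-- def suma_bits_hasta(N):
--     total = 0
--     for i in range(1, N + 1):
--         total += contar_bits(i)
--     return total
--
-- def encontrar_N(X, low, high):
--     if low >= high:
--         return low
--
--     mid = (low + high) // 2
--
--     if suma_bits_hasta(mid) >= X:
--         return encontrar_N(X, low, mid)
--     else:
--         return encontrar_N(X, mid + 1, high)
-- ===== SOURCE B (Python) =====
-- def _pc_sums(n):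
--     # (S(n), S(n-1)) where S(k) = sum of popcounts of 1..k, computed in O(log n)
--     if n == 0:
--         return (0, 0)
--     a, b = _pc_sums(n // 2)
--     m = n // 2
--     if n % 2:
--         return (2 * a + m + 1, a + b + m)
--     else:
--         return (a + b + m, 2 * b + m)
--
-- def suma_bits(N):
--     if N <= 0:
--         return 0
--     return _pc_sums(N)[0]
--
-- def encontrar_N(X, low, high):
--     while low < high:
--         mid = (low + high) // 2
--         if suma_bits(mid) >= X:
--             high = mid
--         else:
--             low = mid + 1
--     return low
-- ===== Notes on version B (the rewrite author's own statement) =====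
-- stated objective: faster
-- what changed: Replaces A's recursive binary search whose probe recomputes the popcount sum by a linear loop over 1..mid with an iterative search whose probe computes that sum in O(log mid) via the pair recurrence (S(n),S(n-1)) with S(2m)=S(m)+S(m-1)+m and S(2m+1)=2S(m)+m+1.
import Mathlib
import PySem

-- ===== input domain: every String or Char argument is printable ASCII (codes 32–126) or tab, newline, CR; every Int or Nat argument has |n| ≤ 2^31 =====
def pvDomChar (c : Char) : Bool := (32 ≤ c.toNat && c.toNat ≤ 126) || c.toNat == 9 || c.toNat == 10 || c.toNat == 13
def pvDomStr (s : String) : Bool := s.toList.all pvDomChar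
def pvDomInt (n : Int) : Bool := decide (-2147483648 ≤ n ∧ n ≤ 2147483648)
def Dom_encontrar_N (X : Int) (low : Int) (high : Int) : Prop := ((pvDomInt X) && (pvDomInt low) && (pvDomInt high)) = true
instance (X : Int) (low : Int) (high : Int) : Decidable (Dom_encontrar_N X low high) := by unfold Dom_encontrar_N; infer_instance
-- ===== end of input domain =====

-- B replaces the linear popcount-sum per probe by an O(log) pair recurrence and the
-- recursion by a while loop; proved equal to A on all inputs (A is total).

-- termination measure facts for the binary-search recursions (cited by decreasing_by)
lemma pvMidLt (low high : Int) (h : low < high) :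
    (PySem.Int.floordiv (low + high) 2 - low).toNat < (high - low).toNat := by
  rw [PySem.Int.floordiv_eq_ediv_of_pos (by omega)]; omega

lemma pvMidGe (low high : Int) (h : low < high) :
    (high - (PySem.Int.floordiv (low + high) 2 + 1)).toNat < (high - low).toNat := by
  rw [PySem.Int.floordiv_eq_ediv_of_pos (by omega)]; omega

-- ===== PORT A =====
-- bin(n).count("1") is exactly Python's n.bit_count() (reads |n|), i.e. PySem.Int.bitCount
def contar_bits (n : Int) : Int := ((PySem.Int.bitCount n : Nat) : Int)

def suma_bits_hasta (N : Int) : Int :=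
  (PySem.List.pyRange 1 (N + 1) 1).foldl (fun total i => total + contar_bits i) 0

def encontrar_N (X : Int) (low : Int) (high : Int) : Int :=
  if low ≥ high then low
  else
    let mid := PySem.Int.floordiv (low + high) 2
    if suma_bits_hasta mid ≥ X then encontrar_N X low mid
    else encontrar_N X (mid + 1) high
termination_by (high - low).toNat
decreasing_by
  · exact pvMidLt low high (by omega)
  · exact pvMidGe low high (by omega)

-- ===== PORT B =====
-- (S(n), S(n-1)) with S(k) = popcount(1)+…+popcount(k); only called with n ≥ 0
def pcSums (n : Nat) : Nat × Nat :=
  if h : n = 0 then (0, 0)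
  else
    let m := n / 2
    let p := pcSums m
    if n % 2 = 1 then (2 * p.1 + m + 1, p.1 + p.2 + m)
    else (p.1 + p.2 + m, 2 * p.2 + m)
decreasing_by exact Nat.div_lt_self (Nat.pos_of_ne_zero h) (by norm_num)

def suma_bits (N : Int) : Int :=
  if N ≤ 0 then 0 else ((pcSums N.toNat).1 : Int)

-- the while loop of B's encontrar_N
def buscaLoop (X : Int) (low : Int) (high : Int) : Int :=
  if low < high then
    let mid := PySem.Int.floordiv (low + high) 2
    if suma_bits mid ≥ X then buscaLoop X low mid
    else buscaLoop X (mid + 1) high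
  else low
termination_by (high - low).toNat
decreasing_by
  · exact pvMidLt low high (by omega)
  · exact pvMidGe low high (by omega)

def encontrar_N_alt (X : Int) (low : Int) (high : Int) : Int := buscaLoop X low high

-- ===== PRECONDITION & SPEC =====
def Spec_encontrar_N (X : Int) (low : Int) (high : Int) (out : Int) : Prop := out = encontrar_N_alt X low high
instance (X : Int) (low : Int) (high : Int) (out : Int) : Decidable (Spec_encontrar_N X low high out) := by unfold Spec_encontrar_N; infer_instance

-- ===== CLAIM (what is proved, stated in full; the proofs are below) =====
def Claim_equal_encontrar_N : Prop := ∀ (X : Int) (low : Int) (high : Int), Dom_encontrar_N X low high → Spec_encontrar_N X low high (encontrar_N X low high)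

-- ===== LEMMAS AND PROOFS =====

-- S k = popcount(1) + … + popcount(k)
def S : Nat → Nat
  | 0 => 0
  | n + 1 => S n + PySem.Int.bitCount ((n + 1 : Nat) : Int)

lemma bc_even (k : Nat) : PySem.Int.bitCount ((2 * k : Nat) : Int) = PySem.Int.bitCount (k : Int) := by
  rcases Nat.eq_zero_or_pos k with hk | hk
  · subst hk; rfl
  · rw [PySem.Int.bitCount_natCast (m := 2 * k) (by omega)]
    have h1 : 2 * k % 2 = 0 := by omega
    have h2 : 2 * k / 2 = k := by omega
    rw [h1, h2]
    omega

lemma bc_odd (k : Nat) : PySem.Int.bitCount ((2 * k + 1 : Nat) : Int) = PySem.Int.bitCount (k : Int) + 1 := by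
  rw [PySem.Int.bitCount_natCast (m := 2 * k + 1) (by omega)]
  have h1 : (2 * k + 1) % 2 = 1 := by omega
  have h2 : (2 * k + 1) / 2 = k := by omega
  rw [h1, h2]; omega

lemma S_succ (k : Nat) : S (k + 1) = S k + PySem.Int.bitCount ((k + 1 : Nat) : Int) := rfl

lemma S_split (m : Nat) : S (2 * m) = S m + S (m - 1) + m ∧ S (2 * m + 1) = 2 * S m + m + 1 := by
  induction m with
  | zero => simp [S]; rfl
  | succ m ih =>
    obtain ⟨he, ho⟩ := ih
    have a1 : S (2 * (m + 1)) = S (2 * m + 1) + PySem.Int.bitCount ((2 * (m + 1) : Nat) : Int) := by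
      rw [show 2 * (m + 1) = (2 * m + 1) + 1 by ring, S_succ]
    have a2 : S (2 * (m + 1) + 1) = S (2 * (m + 1)) + PySem.Int.bitCount ((2 * (m + 1) + 1 : Nat) : Int) :=
      S_succ _
    have hS1 : S (m + 1) = S m + PySem.Int.bitCount ((m + 1 : Nat) : Int) := S_succ m
    rw [bc_even (m + 1)] at a1
    rw [bc_odd (m + 1)] at a2
    constructor
    · rw [a1, ho, hS1]; simp only [Nat.add_sub_cancel]; omega
    · rw [a2, a1, ho, hS1]; omega

lemma pcSums_eq (n : Nat) : pcSums n = (S n, S (n - 1)) := by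
  induction n using Nat.strong_induction_on with
  | _ n ih =>
    rw [pcSums]
    by_cases h : n = 0
    · subst h; simp [S]
    · simp only [h, dite_false]
      have hm : n / 2 < n := Nat.div_lt_self (Nat.pos_of_ne_zero h) (by norm_num)
      rw [ih (n / 2) hm]
      rcases Nat.even_or_odd n with ⟨m, hn⟩ | ⟨m, hn⟩
      · have hd : n / 2 = m := by omega
        have hp : ¬ (n % 2 = 1) := by omega
        simp only [hd, hp, if_false]
        have hm1 : 1 ≤ m := by omega
        have hsplit := S_split m
        have hsplit' := S_split (m - 1)
        have hrw : 2 * (m - 1) + 1 = n - 1 := by omega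
        have hn' : n = 2 * m := by omega
        have c1 : S m + S (m - 1) + m = S (2 * m) := hsplit.1.symm
        have c2 : 2 * S (m - 1) + m = S (2 * m - 1) := by
          have hr : 2 * m - 1 = 2 * (m - 1) + 1 := by omega
          rw [hr, hsplit'.2]
          omega
        rw [hn', c1, c2]
      · have hd : n / 2 = m := by omega
        have hp : n % 2 = 1 := by omega
        simp only [hd, hp, if_true]
        have hsplit := S_split m
        have hn' : n = 2 * m + 1 := by omega
        have c1 : 2 * S m + m + 1 = S (2 * m + 1) := hsplit.2.symm
        have c2 : S m + S (m - 1) + m = S (2 * m + 1 - 1) := by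
          simp only [Nat.add_sub_cancel]
          exact hsplit.1.symm
        rw [hn', c1, c2]

lemma suma_hasta_nat (n : Nat) : suma_bits_hasta (n : Int) = (S n : Int) := by
  induction n with
  | zero =>
    simp only [suma_bits_hasta]
    rw [PySem.List.pyRange_one_eq_nil (by norm_num)]
    simp [S]
  | succ n ih =>
    simp only [suma_bits_hasta] at ih ⊢
    have h1 : ((n + 1 : Nat) : Int) + 1 = ((n : Int) + 1) + 1 := by push_cast; ring
    rw [h1, PySem.List.pyRange_one_succ_right (by omega), List.foldl_append]
    simp only [List.foldl]
    rw [show ((n : Int) + 1) = ((n + 1 : Nat) : Int) by push_cast; ring] at *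
    rw [ih, S, contar_bits]
    push_cast
    ring

lemma sums_eq (N : Int) : suma_bits_hasta N = suma_bits N := by
  by_cases h : N ≤ 0
  · simp only [suma_bits, h, if_true, suma_bits_hasta]
    rw [PySem.List.pyRange_one_eq_nil (by omega)]
    rfl
  · have hN : N = (N.toNat : Int) := by omega
    rw [hN, suma_hasta_nat, suma_bits]
    simp only [Int.toNat_natCast]
    rw [if_neg (by omega), pcSums_eq]

theorem search_eq (X low high : Int) : encontrar_N X low high = buscaLoop X low high := by
  by_cases h : low < high
  · rw [encontrar_N, buscaLoop, if_neg (show ¬ low ≥ high by omega), if_pos h]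
    simp only [sums_eq]
    by_cases hc : suma_bits (PySem.Int.floordiv (low + high) 2) ≥ X
    · rw [if_pos hc, if_pos hc]
      exact search_eq X low _
    · rw [if_neg hc, if_neg hc]
      exact search_eq X _ high
  · rw [encontrar_N, buscaLoop, if_pos (show low ≥ high by omega), if_neg h]
termination_by (high - low).toNat
decreasing_by
  · exact pvMidLt low high (by omega)
  · exact pvMidGe low high (by omega)

-- ===== VERDICT (by name: the statement is the Claim_ definition above) =====
theorem encontrar_N_spec : Claim_equal_encontrar_N := by
  intro X low high _
  unfold Spec_encontrar_N encontrar_N_alt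
  exact search_eq X low high
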